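-- pv_equiv track=rewrite | github.com/SwanyCastle/algorithm-practice | Programers/programers_level1/카드뭉치.py | solution
-- ===== SOURCE A (Python) =====
-- def solution(cards1, cards2, goal):
--     for g in goal:
--         if g in cards1 and cards1.index(g) == 0:
--             cards1.pop(0)
--         elif g in cards2 and cards2.index(g) == 0:
--             cards2.pop(0)
--         else:
--             return 'No'
--     else:
--         return 'Yes'
-- ===== SOURCE B (Python) =====
-- def solution(cards1, cards2, goal):
--     # Two-pointer scan: O(len(goal)); matches A's return value (A also mutates
--     # its card lists in place; this equivalence is about the return value only).
--     i = j = 0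
--     for g in goal:
--         if i < len(cards1) and cards1[i] == g:
--             i += 1
--         elif j < len(cards2) and cards2[j] == g:
--             j += 1
--         else:
--             return 'No'
--     return 'Yes'
-- ===== Notes on version B (the rewrite author's own statement) =====
-- stated objective: faster
-- what changed: Replaces per-goal membership tests, index scans and pop(0) list shifts with two integer pointers advanced over the unmodified card lists.
import Mathlib
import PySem

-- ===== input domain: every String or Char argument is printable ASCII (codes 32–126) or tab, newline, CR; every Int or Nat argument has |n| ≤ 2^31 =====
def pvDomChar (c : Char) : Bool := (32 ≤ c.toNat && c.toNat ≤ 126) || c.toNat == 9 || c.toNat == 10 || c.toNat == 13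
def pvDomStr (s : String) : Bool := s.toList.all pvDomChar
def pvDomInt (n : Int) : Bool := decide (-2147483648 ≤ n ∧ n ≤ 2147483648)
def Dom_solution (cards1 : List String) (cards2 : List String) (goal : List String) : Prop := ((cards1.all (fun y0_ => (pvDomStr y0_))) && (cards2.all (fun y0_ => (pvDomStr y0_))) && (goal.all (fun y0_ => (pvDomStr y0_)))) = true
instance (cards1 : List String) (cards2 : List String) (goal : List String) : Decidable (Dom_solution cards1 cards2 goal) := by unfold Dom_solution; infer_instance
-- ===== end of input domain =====

-- B replaces A's membership/index scans and pop(0) shifts with two pointers (faster).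
-- A mutates cards1/cards2 in place in Python; the equivalence proved is about the return value only.

-- ===== PORT A =====
-- literal port of A: for g in goal, test 'g in cards1 and cards1.index(g) == 0',
-- then cards1.pop(0) (removing the head = .tail, the condition guarantees nonemptiness), etc.
def solution (cards1 : List String) (cards2 : List String) (goal : List String) : String :=
  match goal with
  | [] => "Yes"
  | g :: gs =>
    if cards1.contains g && (PySem.List.index? cards1 g == some 0) then
      solution cards1.tail cards2 gs
    else if cards2.contains g && (PySem.List.index? cards2 g == some 0) then
      solution cards1 cards2.tail gs
    else "No"

-- ===== PORT B =====
-- literal port of B: two pointers i, j; 'i < len(cards1) and cards1[i] == g' is cards1[i]? = some g.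
def solutionAltGo (cards1 : List String) (cards2 : List String) (i j : Nat) : List String → String
  | [] => "Yes"
  | g :: gs =>
    if cards1[i]? = some g then solutionAltGo cards1 cards2 (i + 1) j gs
    else if cards2[j]? = some g then solutionAltGo cards1 cards2 i (j + 1) gs
    else "No"

def solution_alt (cards1 : List String) (cards2 : List String) (goal : List String) : String :=
  solutionAltGo cards1 cards2 0 0 goal

-- ===== PRECONDITION & SPEC =====
def Spec_solution (cards1 : List String) (cards2 : List String) (goal : List String) (out : String) : Prop := out = solution_alt cards1 cards2 goal
instance (cards1 : List String) (cards2 : List String) (goal : List String) (out : String) : Decidable (Spec_solution cards1 cards2 goal out) := by unfold Spec_solution; infer_instance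

-- ===== CLAIM (what is proved, stated in full; the proofs are below) =====
def Claim_equal_solution : Prop := ∀ (cards1 : List String) (cards2 : List String) (goal : List String), Dom_solution cards1 cards2 goal → Spec_solution cards1 cards2 goal (solution cards1 cards2 goal)

-- ===== LEMMAS AND PROOFS =====

-- A's front-card test on a list is exactly 'head? = some g'.
theorem frontTest_eq_head? (l : List String) (g : String) :
    (l.contains g && (PySem.List.index? l g == some 0)) = (l.head? == some g) := by
  cases l with
  | nil => simp [PySem.List.index?]
  | cons x t =>
    by_cases h : x = g
    · subst h; simp [List.idxOf?_cons]
    · cases hIdx : List.idxOf? g t <;> simp [List.idxOf?_cons, h, Ne.symm h, hIdx]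

theorem solution_drop_eq_go (goal : List String) :
    ∀ (cards1 cards2 : List String) (i j : Nat),
      solution (cards1.drop i) (cards2.drop j) goal = solutionAltGo cards1 cards2 i j goal := by
  induction goal with
  | nil => intro c1 c2 i j; simp [solution, solutionAltGo]
  | cons g gs ih =>
    intro c1 c2 i j
    rw [solution, solutionAltGo, frontTest_eq_head?, frontTest_eq_head?]
    rw [List.head?_drop, List.head?_drop]
    by_cases h1 : c1[i]? = some g
    · rw [if_pos (by simp [h1]), if_pos h1, List.tail_drop, ih]
    · rw [if_neg (by simp [h1]), if_neg h1]
      by_cases h2 : c2[j]? = some g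
      · rw [if_pos (by simp [h2]), if_pos h2, List.tail_drop, ih]
      · rw [if_neg (by simp [h2]), if_neg h2]

-- ===== VERDICT (by name: the statement is the Claim_ definition above) =====
theorem solution_spec : Claim_equal_solution := by
  intro c1 c2 goal _
  unfold Spec_solution solution_alt
  have := solution_drop_eq_go goal c1 c2 0 0
  simpa using this
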